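-- pv_equiv track=rewrite | github.com/sony-jun/01-ALGORITHM | 3회차/김태형/220804/1652.py | sleep
-- ===== SOURCE A (Python) =====
-- def sleep(m):
--     row_sum=0
--     row=0
--     rows=0
--     for j in range(len(m)):
--         for i in m[j]:
--             if i=='.':
--                 row_sum+=1
--                 if row_sum>=2:
--                     row=1
--             if i!='.':
--                 row_sum=0
--         rows+=row
--     return rows
-- ===== SOURCE B (Python) =====
-- def sleep(m):
--     # Staged approach: flatten the grid into one string (run carries across rows),
--     # substring-search the first ".." pair, then locate the row holding the pair's
--     # second dot via cumulative row lengths.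
--     flat = ''.join(m)
--     k = flat.find('..')
--     if k == -1:
--         return 0
--     seen = 0
--     for j in range(len(m)):
--         seen += len(m[j])
--         if seen > k + 1:
--             return len(m) - j
--     return 0
-- ===== Notes on version B (the rewrite author's own statement) =====
-- stated objective: alternative
-- what changed: Replaces A's cell-by-cell counter-with-sticky-flag scan by a staged pipeline: join the rows into one string, substring-search the first '..' pair with str.find, then map its second character's flat index back to a row via cumulative row lengths and return len(m) minus that row.
import Mathlib
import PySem

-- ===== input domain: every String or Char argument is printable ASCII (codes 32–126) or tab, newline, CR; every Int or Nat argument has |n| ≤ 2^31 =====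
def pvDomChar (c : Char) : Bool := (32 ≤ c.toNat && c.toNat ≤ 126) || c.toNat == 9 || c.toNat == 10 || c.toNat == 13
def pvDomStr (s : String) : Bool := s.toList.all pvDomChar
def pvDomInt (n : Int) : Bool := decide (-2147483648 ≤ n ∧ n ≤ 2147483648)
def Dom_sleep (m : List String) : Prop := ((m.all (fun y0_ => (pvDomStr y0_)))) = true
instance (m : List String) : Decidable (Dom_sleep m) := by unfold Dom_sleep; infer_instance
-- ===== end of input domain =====

-- B replaces A's cell-by-cell counter-with-sticky-flag scan by a staged pipeline: join all rows into one
-- string, substring-search the first ".." pair, locate its second dot's row by cumulative lengths.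

-- ===== PORT A =====
-- inner loop body: for i in m[j]: if i=='.': row_sum+=1; if row_sum>=2: row=1;  if i!='.': row_sum=0
def sleepStep (p : Int × Int) (i : Char) : Int × Int :=
  if i = '.' then (p.1 + 1, if p.1 + 1 ≥ 2 then 1 else p.2) else (0, p.2)

-- outer loop body over rows: state (row_sum, row, rows)
def sleepRow (st : Int × Int × Int) (s : String) : Int × Int × Int :=
  let p := s.toList.foldl sleepStep (st.1, st.2.1)
  (p.1, p.2, st.2.2 + p.2)

def sleep (m : List String) : Int :=
  (m.foldl sleepRow (0, 0, 0)).2.2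

-- ===== PORT B =====
-- the locating loop: for j in range(len(m)): seen += len(m[j]); if seen > k+1: return len(m)-j
def sleepLoc (total k seen j : Int) : List String → Int
  | [] => 0
  | s :: rest =>
    let seen' := seen + PySem.Str.len s
    if seen' > k + 1 then total - j else sleepLoc total k seen' (j + 1) rest

def sleep_alt (m : List String) : Int :=
  let flat := PySem.Str.join "" m
  let k := PySem.Str.find flat ".."
  if k = -1 then 0 else sleepLoc (m.length : Int) k 0 0 m

-- ===== PRECONDITION & SPEC =====
def Spec_sleep (m : List String) (out : Int) : Prop := out = sleep_alt m
instance (m : List String) (out : Int) : Decidable (Spec_sleep m out) := by unfold Spec_sleep; infer_instance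

-- ===== CLAIM (what is proved, stated in full; the proofs are below) =====
def Claim_equal_sleep : Prop := ∀ (m : List String), Dom_sleep m → Spec_sleep m (sleep m)

-- ===== LEMMAS AND PROOFS =====

-- the double-dot pattern
def dd : List Char := ['.', '.']

-- scan one row's chars carrying the run; none = run reached 2 during this row, some r = final run
def rowScan (run : Int) : List Char → Option Int
  | [] => some run
  | c :: cs =>
    let r := if c = '.' then run + 1 else 0
    if r ≥ 2 then none else rowScan r cs

-- A's result characterised: remaining-row count at the trigger row
def sleepTrig (run : Int) : List String → Int
  | [] => 0
  | s :: rest =>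
    match rowScan run s.toList with
    | none => ((s :: rest).length : Int)
    | some r => sleepTrig r rest

-- B's locate loop characterised the same way
def locTrig (k seen : Int) : List String → Int
  | [] => 0
  | s :: rest =>
    if seen + (s.toList.length : Int) > k + 1 then ((s :: rest).length : Int)
    else locTrig k (seen + (s.toList.length : Int)) rest

def flatChars (L : List String) : List Char := (L.map String.toList).flatten

-- ---- A-side: sleep = sleepTrig 0 ----

theorem foldl_step_row_one (cs : List Char) : ∀ (rs : Int),
    (cs.foldl sleepStep (rs, 1)).2 = 1 := by
  induction cs with
  | nil => intro rs; rfl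
  | cons c cs ih =>
    intro rs
    simp only [List.foldl, sleepStep]
    by_cases hc : c = '.'
    · simp only [hc]
      by_cases h2 : rs + 1 ≥ 2 <;> simp [h2, ih]
    · simp [hc, ih]

theorem foldl_step_of_rowScan_some (cs : List Char) : ∀ (rs r r' : Int),
    rowScan rs cs = some r' → cs.foldl sleepStep (rs, r) = (r', r) := by
  induction cs with
  | nil => intro rs r r' h; simp [rowScan] at h; simp [h]
  | cons c cs ih =>
    intro rs r r' h
    simp only [rowScan] at h
    simp only [List.foldl, sleepStep]
    by_cases hc : c = '.'
    · simp only [hc, if_true] at h ⊢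
      by_cases h2 : rs + 1 ≥ 2
      · simp [h2] at h
      · simp only [if_neg h2] at h ⊢
        exact ih _ _ _ h
    · simp only [if_neg hc] at h ⊢
      have hz : ¬ ((0 : Int) ≥ 2) := by omega
      simp only [if_neg hz] at h
      exact ih _ _ _ h

theorem foldl_step_of_rowScan_none (cs : List Char) : ∀ (rs r : Int),
    rowScan rs cs = none → (cs.foldl sleepStep (rs, r)).2 = 1 := by
  induction cs with
  | nil => intro rs r h; simp [rowScan] at h
  | cons c cs ih =>
    intro rs r h
    simp only [rowScan] at h
    simp only [List.foldl, sleepStep]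
    by_cases hc : c = '.'
    · simp only [hc, if_true] at h ⊢
      by_cases h2 : rs + 1 ≥ 2
      · simp only [if_pos h2]
        exact foldl_step_row_one cs (rs + 1)
      · simp only [if_neg h2] at h ⊢
        exact ih _ _ h
    · simp only [if_neg hc] at h ⊢
      have hz : ¬ ((0 : Int) ≥ 2) := by omega
      simp only [if_neg hz] at h
      exact ih _ _ h

theorem foldl_row_one (L : List String) : ∀ (rs rows : Int),
    (L.foldl sleepRow (rs, 1, rows)).2.2 = rows + (L.length : Int) := by
  induction L with
  | nil => intro rs rows; simp
  | cons s rest ih =>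
    intro rs rows
    simp only [List.foldl, sleepRow]
    rw [show (s.toList.foldl sleepStep (rs, 1)) =
        ((s.toList.foldl sleepStep (rs, 1)).1, 1) from
      Prod.ext rfl (foldl_step_row_one s.toList rs)]
    rw [ih]
    simp [List.length_cons]
    ring

theorem foldl_row_zero (L : List String) : ∀ (rs rows : Int),
    (L.foldl sleepRow (rs, 0, rows)).2.2 = rows + sleepTrig rs L := by
  induction L with
  | nil => intro rs rows; simp [sleepTrig]
  | cons s rest ih =>
    intro rs rows
    simp only [List.foldl, sleepRow, sleepTrig]
    cases h : rowScan rs s.toList with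
    | none =>
      rw [show (s.toList.foldl sleepStep (rs, 0)) =
          ((s.toList.foldl sleepStep (rs, 0)).1, 1) from
        Prod.ext rfl (foldl_step_of_rowScan_none s.toList rs 0 h)]
      rw [foldl_row_one]
      simp [List.length_cons]
      ring
    | some r =>
      rw [foldl_step_of_rowScan_some s.toList rs 0 r h]
      simpa using ih r rows

-- ---- char-level facts about rowScan and the ".." pattern ----

theorem rowScan_append (xs : List Char) : ∀ (ys : List Char) (run : Int),
    rowScan run (xs ++ ys) =
      match rowScan run xs with
      | none => none
      | some r => rowScan r ys := by
  induction xs with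
  | nil => intro ys run; rfl
  | cons c cs ih =>
    intro ys run
    simp only [List.cons_append, rowScan]
    by_cases h2 : (if c = '.' then run + 1 else 0) ≥ 2
    · simp [h2]
    · simp only [if_neg h2]
      exact ih ys _

theorem prefix_singleton_dot_iff (cs : List Char) :
    ['.'] <+: cs ↔ cs.head? = some '.' := by
  cases cs with
  | nil => simp
  | cons c cs =>
    constructor
    · intro h
      rcases (List.cons_prefix_cons.mp h) with ⟨h1, _⟩
      subst h1; rfl
    · intro h
      simp only [List.head?_cons, Option.some.injEq] at h
      exact List.cons_prefix_cons.mpr ⟨h.symm, List.nil_prefix⟩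

theorem rowScan_none_iff (cs : List Char) : ∀ (run : Int), 0 ≤ run →
    (rowScan run cs = none ↔ (1 ≤ run ∧ cs.head? = some '.') ∨ dd <:+: cs) := by
  induction cs with
  | nil =>
    intro run _
    simp [rowScan, dd]
  | cons c cs ih =>
    intro run hrun
    simp only [rowScan]
    have hinfix : dd <:+: c :: cs ↔ dd <+: c :: cs ∨ dd <:+: cs := List.infix_cons_iff
    by_cases hc : c = '.'
    · subst hc
      rw [if_pos rfl]
      by_cases h1 : 1 ≤ run
      · rw [if_pos (by omega)]
        constructor
        · intro _; exact Or.inl ⟨h1, rfl⟩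
        · intro _; rfl
      · have hr0 : run = 0 := by omega
        subst hr0
        rw [if_neg (by omega)]
        simp only [zero_add]
        rw [ih 1 (by omega)]
        have hpref : dd <+: '.' :: cs ↔ cs.head? = some '.' := by
          constructor
          · intro h
            rcases (List.cons_prefix_cons.mp h) with ⟨_, h2'⟩
            exact (prefix_singleton_dot_iff cs).mp h2'
          · intro h
            exact List.cons_prefix_cons.mpr ⟨rfl, (prefix_singleton_dot_iff cs).mpr h⟩
        rw [hinfix, hpref]
        constructor
        · rintro (⟨_, h⟩ | h)
          · exact Or.inr (Or.inl h)
          · exact Or.inr (Or.inr h)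
        · rintro (⟨h1', _⟩ | (h | h))
          · omega
          · exact Or.inl ⟨le_refl 1, h⟩
          · exact Or.inr h
    · rw [if_neg hc, if_neg (by omega)]
      rw [ih 0 (le_refl 0)]
      have hpref : ¬ (dd <+: c :: cs) := by
        intro h
        exact hc (List.cons_prefix_cons.mp h).1.symm
      rw [hinfix]
      constructor
      · rintro (⟨h1', _⟩ | h)
        · omega
        · exact Or.inr (Or.inr h)
      · rintro (⟨_, hh⟩ | (h | h))
        · simp only [List.head?_cons, Option.some.injEq] at hh
          exact absurd hh hc
        · exact absurd h hpref
        · exact Or.inr h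

theorem rowScan_zero_none_iff (cs : List Char) : rowScan 0 cs = none ↔ dd <:+: cs := by
  rw [rowScan_none_iff cs 0 (le_refl 0)]
  constructor
  · rintro (⟨h, _⟩ | h)
    · omega
    · exact h
  · exact Or.inr

theorem infix_iff_drop (u : List Char) :
    dd <:+: u ↔ ∃ i : Nat, i + 2 ≤ u.length ∧ dd <+: u.drop i := by
  constructor
  · rintro ⟨s, t, hst⟩
    refine ⟨s.length, ?_, ?_⟩
    · have : u.length = s.length + 2 + t.length := by
        rw [← hst]; simp [dd]; ring
      omega
    · have h2 : s ++ (dd ++ t) = u := by rw [← List.append_assoc]; exact hst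
      have : u.drop s.length = dd ++ t := by
        rw [← h2, List.drop_left]
      rw [this]
      exact List.prefix_append dd t
  · rintro ⟨i, _, hp⟩
    exact hp.isInfix.trans (List.drop_suffix i u).isInfix

theorem prefix_drop_append_of (u rest : List Char) (i : Nat) (hi : i + 2 ≤ u.length)
    (h : dd <+: u.drop i) : dd <+: (u ++ rest).drop i := by
  rw [List.drop_append_of_le_length (by omega)]
  exact h.trans (List.prefix_append _ rest)

theorem prefix_drop_of_append (u rest : List Char) (i : Nat) (hi : i + 2 ≤ u.length)
    (h : dd <+: (u ++ rest).drop i) : dd <+: u.drop i := by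
  rw [List.drop_append_of_le_length (by omega)] at h
  have hlen : dd.length ≤ (u.drop i).length := by
    simp [dd]; omega
  have := List.prefix_iff_eq_take.mp h
  rw [List.take_append_of_le_length hlen] at this
  rw [this]
  exact List.take_prefix _ _

-- ---- the main bridge: sleepTrig vs find + locTrig ----

theorem main_bridge (L : List String) : ∀ (pre : List Char) (run : Int),
    rowScan 0 pre = some run →
    sleepTrig run L =
      (if PySem.Chars.find (pre ++ flatChars L) dd = -1 then 0
       else locTrig (PySem.Chars.find (pre ++ flatChars L) dd) (pre.length : Int) L) := by
  induction L with
  | nil =>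
    intro pre run hpre
    have hni : ¬ dd <:+: pre := by
      intro h
      rw [← rowScan_zero_none_iff] at h
      rw [hpre] at h; simp at h
    have : PySem.Chars.find (pre ++ flatChars []) dd = -1 := by
      rw [PySem.Chars.find_eq_neg_one_iff _ _]
      simpa [flatChars] using hni
    simp [sleepTrig, this]
  | cons s rest ih =>
    intro pre run hpre
    have hflat : pre ++ flatChars (s :: rest) = (pre ++ s.toList) ++ flatChars rest := by
      simp [flatChars]
    have hcomb : rowScan 0 (pre ++ s.toList) = rowScan run s.toList := by
      rw [rowScan_append, hpre]
    have hulen : (pre ++ s.toList).length = pre.length + s.toList.length := by simp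
    rw [hflat]
    simp only [sleepTrig]
    cases hscan : rowScan run s.toList with
    | none =>
      -- trigger inside this row: find lands within pre ++ s.toList
      change ((s :: rest).length : Int) = _
      have hinf : dd <:+: (pre ++ s.toList) := by
        rw [← rowScan_zero_none_iff, hcomb]; exact hscan
      rcases (infix_iff_drop (pre ++ s.toList)).mp hinf with ⟨i, hi2, hip⟩
      have hdropflat : dd <+: ((pre ++ s.toList) ++ flatChars rest).drop i :=
        prefix_drop_append_of _ _ i hi2 hip
      have hinff : dd <:+: ((pre ++ s.toList) ++ flatChars rest) :=
        hdropflat.isInfix.trans (List.drop_suffix i _).isInfix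
      have hfne : PySem.Chars.find ((pre ++ s.toList) ++ flatChars rest) dd ≠ -1 :=
        (PySem.Chars.find_ne_neg_one_iff _ _).mpr hinff
      have hfnn : 0 ≤ PySem.Chars.find ((pre ++ s.toList) ++ flatChars rest) dd :=
        (PySem.Chars.find_nonneg_iff _ _).mpr hinff
      have hspec := PySem.Chars.find_spec hfnn
      have hle : (PySem.Chars.find ((pre ++ s.toList) ++ flatChars rest) dd).toNat ≤ i := by
        by_contra hlt
        push_neg at hlt
        exact (hspec.2 i (by omega)) hdropflat
      rw [if_neg hfne]
      simp only [locTrig]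
      rw [if_pos (by push_cast; omega)]
    | some r =>
      have hcu : rowScan 0 (pre ++ s.toList) = some r := by rw [hcomb]; exact hscan
      change sleepTrig r rest = _
      rw [ih (pre ++ s.toList) r hcu]
      by_cases hk : PySem.Chars.find ((pre ++ s.toList) ++ flatChars rest) dd = -1
      · rw [if_pos hk, if_pos hk]
      · rw [if_neg hk, if_neg hk]
        have hfnn : 0 ≤ PySem.Chars.find ((pre ++ s.toList) ++ flatChars rest) dd := by
          have := PySem.Chars.neg_one_le_find ((pre ++ s.toList) ++ flatChars rest) dd
          omega
        have hspec := PySem.Chars.find_spec hfnn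
        have hkge : ((pre ++ s.toList).length : Int) ≤
            PySem.Chars.find ((pre ++ s.toList) ++ flatChars rest) dd + 1 := by
          by_contra hlt
          push_neg at hlt
          have hi2 : (PySem.Chars.find ((pre ++ s.toList) ++ flatChars rest) dd).toNat + 2 ≤
              (pre ++ s.toList).length := by omega
          have hip : dd <+: (pre ++ s.toList).drop
              (PySem.Chars.find ((pre ++ s.toList) ++ flatChars rest) dd).toNat :=
            prefix_drop_of_append _ _ _ hi2 hspec.1
          have hbad : dd <:+: (pre ++ s.toList) :=
            hip.isInfix.trans (List.drop_suffix _ _).isInfix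
          rw [← rowScan_zero_none_iff, hcu] at hbad
          simp at hbad
        simp only [locTrig]
        rw [if_neg (by push_cast; omega)]
        have hseen : (((pre ++ s.toList).length : Nat) : Int) =
            (pre.length : Int) + (s.toList.length : Int) := by
          rw [hulen]; push_cast; ring
        rw [hseen]

-- ---- B-port bookkeeping bridges ----

theorem sleepLoc_eq_locTrig (L : List String) : ∀ (total k seen j : Int),
    total - j = (L.length : Int) → sleepLoc total k seen j L = locTrig k seen L := by
  induction L with
  | nil => intro total k seen j _; rfl
  | cons s rest ih =>
    intro total k seen j h
    simp only [sleepLoc, locTrig]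
    have hlen : PySem.Str.len s = (s.toList.length : Int) := by
      simp [PySem.Str.len]
    rw [hlen]
    by_cases hc : seen + (s.toList.length : Int) > k + 1
    · rw [if_pos hc, if_pos hc]
      omega
    · rw [if_neg hc, if_neg hc]
      apply ih
      simp only [List.length_cons] at h ⊢
      push_cast at h ⊢
      omega

theorem join_empty_flatten (L : List (List Char)) :
    PySem.Chars.join [] L = L.flatten := by
  induction L with
  | nil => simp [PySem.Chars.join_nil]
  | cons a L ih =>
    cases L with
    | nil => simp [PySem.Chars.join_singleton]
    | cons b R =>
      rw [PySem.Chars.join_cons_cons]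
      simp only [List.flatten_cons] at ih ⊢
      rw [ih]
      simp

theorem toList_join_empty (m : List String) :
    (PySem.Str.join "" m).toList = flatChars m := by
  rw [PySem.Str.toList_join]
  simpa [flatChars] using join_empty_flatten (m.map String.toList)

-- ===== VERDICT (by name: the statement is the Claim_ definition above) =====
theorem sleep_spec : Claim_equal_sleep := by
  intro m _
  unfold Spec_sleep sleep sleep_alt
  rw [foldl_row_zero]
  have hA : sleepTrig 0 m =
      (if PySem.Chars.find (flatChars m) dd = -1 then 0
       else locTrig (PySem.Chars.find (flatChars m) dd) (0 : Int) m) := by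
    have := main_bridge m [] 0 (by rfl)
    simpa using this
  have hfind : PySem.Str.find (PySem.Str.join "" m) ".." = PySem.Chars.find (flatChars m) dd := by
    rw [PySem.Str.find_eq, toList_join_empty]
    rfl
  simp only [hfind]
  by_cases hk : PySem.Chars.find (flatChars m) dd = -1
  · simp [hk, hA]
  · rw [hA, if_neg hk, if_neg hk]
    rw [sleepLoc_eq_locTrig m _ _ 0 0 (by simp)]
    omega
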